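-- pv_equiv track=rewrite | github.com/zbingf/pyadams | pyadams/file/bdf_transient_modal.py | create_dload_unit_str
-- ===== SOURCE A (Python) =====
-- HMNAME      = '$HMNAME'.ljust(8)
--
-- HWCOLOR     = '$HWCOLOR'.ljust(8)
--
-- LOADCOL     = 'LOADCOL'.ljust(8)
--
-- EMPTY       = ' '.ljust(8)
--
-- strint      = lambda value: str(value).rjust(8)
--
-- def str_list_change(prefix, list1, nlen):
--     """
--         将数据转化为规则多行数据
--         prefix 前缀
--         list1   单列数据
--         nlen    每行数据长度
--     """
--     isStart = True
--     list_2  = []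
--     for loc, value in enumerate(list1):
--         if divmod(loc, nlen)[1] == 0:
--             if isStart:
--                 line, isStart = [value], False
--                 continue
--             list_2.append(line)
--             line = [value]
--             continue
--         line.append(value)
--     list_2.append(line)
--
--     strs = [prefix + ','.join([str(nid) for nid in line]) for line in list_2]
--
--     return '\n'.join(strs)
--
-- def loadcol_title_str(name, nid, color=5):
--     """
--         LOADCOL 开头
--     """
--     line1 = HMNAME+LOADCOL+EMPTY+strint(nid)+f'"{name}"'
--     line2 = HWCOLOR+LOADCOL+EMPTY+strint(nid)+strint(color)
--     return '\n'.join([line1, line2])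
--
-- def create_dload_unit_str(dload_name, dload_id, tload1_ids,
--                         color=5):
--     """
--
--     """
--
--     line1 = loadcol_title_str(dload_name, dload_id, color)
--     if len(tload1_ids)>3:
--         line2 = f'DLOAD,{dload_id},1.0,' +\
--                 ','.join(['1.0,'+str(nid) for nid in tload1_ids[:3]])
--
--         new_strs = ['1.0,'+str(nid) for nid in tload1_ids[3:]]
--
--         line2 += '\n'+str_list_change('+,', new_strs, 4)
--     else:
--         line2 = f'DLOAD,{dload_id},1.0,' +\
--                 ','.join(['1.0,'+str(nid) for nid in tload1_ids])
--
--     return '\n'.join([line1, line2])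
-- ===== SOURCE B (Python) =====
-- HMNAME      = '$HMNAME'.ljust(8)
-- HWCOLOR     = '$HWCOLOR'.ljust(8)
-- LOADCOL     = 'LOADCOL'.ljust(8)
-- EMPTY       = ' '.ljust(8)
--
-- def create_dload_unit_str(dload_name, dload_id, tload1_ids,
--                         color=5):
--     lines = [HMNAME + LOADCOL + EMPTY + str(dload_id).rjust(8) + f'"{dload_name}"',
--              HWCOLOR + LOADCOL + EMPTY + str(dload_id).rjust(8) + str(color).rjust(8)]
--     entries = ['1.0,' + str(nid) for nid in tload1_ids]
--     lines.append(f'DLOAD,{dload_id},1.0,' + ','.join(entries[:3]))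
--     rest = entries[3:]
--     i = 0
--     while i < len(rest):
--         lines.append('+,' + ','.join(rest[i:i+4]))
--         i += 4
--     return '\n'.join(lines)
-- ===== Notes on version B (the rewrite author's own statement) =====
-- stated objective: simpler
-- what changed: Replaces the isStart/divmod state-machine loop (str_list_change) and the separate len>3 branch with one flat build: make all '1.0,<id>' entries once, join the first three onto the DLOAD line, then walk the remainder by index in steps of four for the '+,' continuation lines.
import Mathlib
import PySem

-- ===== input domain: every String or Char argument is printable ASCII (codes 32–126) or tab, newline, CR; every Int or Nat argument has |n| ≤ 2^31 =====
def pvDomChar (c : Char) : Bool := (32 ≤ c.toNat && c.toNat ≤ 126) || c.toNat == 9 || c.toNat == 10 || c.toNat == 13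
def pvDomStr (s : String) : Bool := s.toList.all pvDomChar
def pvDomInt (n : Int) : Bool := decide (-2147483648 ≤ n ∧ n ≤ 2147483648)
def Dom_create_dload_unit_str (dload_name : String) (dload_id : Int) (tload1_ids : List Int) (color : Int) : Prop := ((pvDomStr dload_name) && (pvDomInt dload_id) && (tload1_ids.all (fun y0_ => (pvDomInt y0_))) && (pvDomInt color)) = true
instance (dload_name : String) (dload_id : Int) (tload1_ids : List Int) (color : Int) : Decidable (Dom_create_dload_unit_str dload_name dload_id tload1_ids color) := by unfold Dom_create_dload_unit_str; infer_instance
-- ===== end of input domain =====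

-- B replaces A's isStart/divmod state-machine loop and >3 branch with a flat build:
-- all '1.0,<id>' entries once, first three on the DLOAD line, the rest sliced into
-- groups of four for '+,' continuation lines (objective: simpler; same O(n) cost).

-- ===== shared module-level constants (both sources define them identically) =====
-- '<lit>'.ljust(8) / str(v).rjust(8): pad with spaces to width 8 (exact; Python never truncates)
def pvLjust8 (s : List Char) : List Char := s ++ List.replicate (8 - s.length) ' '
def pvRjust8 (s : List Char) : List Char := List.replicate (8 - s.length) ' ' ++ s
def pvHMNAME  : List Char := pvLjust8 "$HMNAME".toList
def pvHWCOLOR : List Char := pvLjust8 "$HWCOLOR".toList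
def pvLOADCOL : List Char := pvLjust8 "LOADCOL".toList
def pvEMPTY   : List Char := pvLjust8 " ".toList

-- ===== PORT A =====
-- strint = lambda value: str(value).rjust(8)
def pvStrint (v : Int) : List Char := pvRjust8 (PySem.Int.toChars v)

-- the loop of str_list_change: state (isStart, line, list_2), loc the enumerate index;
-- divmod(loc, nlen)[1] is ported as PySem.Int.mod loc nlen (exact: A only calls nlen = 4 ≠ 0)
def pvSLCloop (nlen : Int) : List (List Char) → Int → Bool → List (List Char) → List (List (List Char)) → List (List (List Char))
  | [], _, _, line, acc => acc ++ [line]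
  | v :: tl, loc, isStart, line, acc =>
    if PySem.Int.mod loc nlen == 0 then
      if isStart then pvSLCloop nlen tl (loc + 1) false [v] acc
      else pvSLCloop nlen tl (loc + 1) false [v] (acc ++ [line])
    else pvSLCloop nlen tl (loc + 1) isStart (line ++ [v]) acc

-- str_list_change(prefix, list1, nlen); str(nid) on a str is the identity, so the inner
-- comprehension joins the lines as they are
def pvStrListChange (pfx : List Char) (list1 : List (List Char)) (nlen : Int) : List Char :=
  PySem.Chars.join "\n".toList
    ((pvSLCloop nlen list1 0 true [] []).map (fun line => pfx ++ PySem.Chars.join ",".toList line))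

-- loadcol_title_str(name, nid, color)
def pvLoadcolTitle (name : List Char) (nid : Int) (color : Int) : List Char :=
  PySem.Chars.join "\n".toList
    [pvHMNAME ++ pvLOADCOL ++ pvEMPTY ++ pvStrint nid ++ ('"' :: name ++ ['"']),
     pvHWCOLOR ++ pvLOADCOL ++ pvEMPTY ++ pvStrint nid ++ pvStrint color]

def create_dload_unit_str (dload_name : String) (dload_id : Int) (tload1_ids : List Int) (color : Int) : String :=
  let line1 := pvLoadcolTitle dload_name.toList dload_id color
  if tload1_ids.length > 3 then
    let line2 := "DLOAD,".toList ++ PySem.Int.toChars dload_id ++ ",1.0,".toList ++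
      PySem.Chars.join ",".toList
        ((PySem.List.slice tload1_ids none (some 3)).map (fun nid => "1.0,".toList ++ PySem.Int.toChars nid))
    let new_strs := (PySem.List.slice tload1_ids (some 3) none).map (fun nid => "1.0,".toList ++ PySem.Int.toChars nid)
    let line2' := line2 ++ "\n".toList ++ pvStrListChange "+,".toList new_strs 4
    String.ofList (PySem.Chars.join "\n".toList [line1, line2'])
  else
    let line2 := "DLOAD,".toList ++ PySem.Int.toChars dload_id ++ ",1.0,".toList ++
      PySem.Chars.join ",".toList (tload1_ids.map (fun nid => "1.0,".toList ++ PySem.Int.toChars nid))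
    String.ofList (PySem.Chars.join "\n".toList [line1, line2])

-- ===== PORT B =====
-- the while-loop of Source B: i steps 0,4,8,… over rest, each step emits a '+,' line of rest[i:i+4]
def pvContLines (rest : List (List Char)) (i : Int) : List (List Char) :=
  if i < PySem.List.len rest then
    ("+,".toList ++ PySem.Chars.join ",".toList (PySem.List.slice rest (some i) (some (i + 4))))
      :: pvContLines rest (i + 4)
  else []
termination_by ((PySem.List.len rest) - i).toNat
decreasing_by simp only [PySem.List.len] at *; omega

def create_dload_unit_str_alt (dload_name : String) (dload_id : Int) (tload1_ids : List Int) (color : Int) : String :=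
  let lines := [pvHMNAME ++ pvLOADCOL ++ pvEMPTY ++ pvRjust8 (PySem.Int.toChars dload_id) ++ ('"' :: dload_name.toList ++ ['"']),
                pvHWCOLOR ++ pvLOADCOL ++ pvEMPTY ++ pvRjust8 (PySem.Int.toChars dload_id) ++ pvRjust8 (PySem.Int.toChars color)]
  let entries := tload1_ids.map (fun nid => "1.0,".toList ++ PySem.Int.toChars nid)
  let lines := lines ++ ["DLOAD,".toList ++ PySem.Int.toChars dload_id ++ ",1.0,".toList ++
                 PySem.Chars.join ",".toList (PySem.List.slice entries none (some 3))]
  let rest := PySem.List.slice entries (some 3) none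
  String.ofList (PySem.Chars.join "\n".toList (lines ++ pvContLines rest 0))

-- ===== PRECONDITION & SPEC =====
def Spec_create_dload_unit_str (dload_name : String) (dload_id : Int) (tload1_ids : List Int) (color : Int) (out : String) : Prop := out = create_dload_unit_str_alt dload_name dload_id tload1_ids color
instance (dload_name : String) (dload_id : Int) (tload1_ids : List Int) (color : Int) (out : String) : Decidable (Spec_create_dload_unit_str dload_name dload_id tload1_ids color out) := by unfold Spec_create_dload_unit_str; infer_instance

-- ===== CLAIM (what is proved, stated in full; the proofs are below) =====
def Claim_equal_create_dload_unit_str : Prop := ∀ (dload_name : String) (dload_id : Int) (tload1_ids : List Int) (color : Int), Dom_create_dload_unit_str dload_name dload_id tload1_ids color → Spec_create_dload_unit_str dload_name dload_id tload1_ids color (create_dload_unit_str dload_name dload_id tload1_ids color)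

-- ===== LEMMAS AND PROOFS =====

-- groups of four, the common shape both loops produce
def pvChunks4 {α : Type} : List α → List (List α)
  | [] => []
  | v :: tl => ((v :: tl).take 4) :: pvChunks4 ((v :: tl).drop 4)
termination_by l => l.length
decreasing_by simp

theorem pvMod4 (a : Int) : PySem.Int.mod a 4 = a % 4 := by
  rw [PySem.Int.mod, Int.fmod_eq_emod]; simp

-- A's loop after the first element: the current line absorbs the (4 - loc%4) % 4 next
-- elements, then the remainder is chunked in fours
theorem pvSLCloop_gen (l : List (List Char)) : ∀ (loc : Int) (line : List (List Char))
    (acc : List (List (List Char))), 0 ≤ loc →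
    pvSLCloop 4 l loc false line acc
      = acc ++ (line ++ l.take (((4 - loc % 4) % 4).toNat)) :: pvChunks4 (l.drop (((4 - loc % 4) % 4).toNat)) := by
  induction l with
  | nil => intro loc line acc _; simp [pvSLCloop, pvChunks4]
  | cons v tl ih =>
    intro loc line acc hloc
    have hm : PySem.Int.mod loc 4 = loc % 4 := pvMod4 loc
    have hm' : (loc + 1) % 4 = (loc % 4 + 1) % 4 := by omega
    by_cases h0 : loc % 4 = 0
    · rw [pvSLCloop, if_pos (by simp [h0])]
      rw [ih (loc + 1) [v] (acc ++ [line]) (by omega)]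
      have : ((4 - (loc + 1) % 4) % 4).toNat = 3 := by omega
      rw [this]
      have h4 : ((4 - loc % 4) % 4).toNat = 0 := by omega
      rw [h4]
      simp [pvChunks4]
    · rw [pvSLCloop, if_neg (by simp [h0])]
      rw [ih (loc + 1) (line ++ [v]) acc (by omega)]
      have hr : ((4 - loc % 4) % 4).toNat = ((4 - (loc + 1) % 4) % 4).toNat + 1 := by omega
      rw [hr]
      simp

-- B's while-loop from index k produces exactly the '+,'-prefixed joins of the chunks of l.drop k
theorem pvContLines_eq (l : List (List Char)) : ∀ (fuel k : Nat), l.length - k ≤ fuel →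
    pvContLines l (k : Int)
      = (pvChunks4 (l.drop k)).map (fun c => "+,".toList ++ PySem.Chars.join ",".toList c) := by
  intro fuel
  induction fuel with
  | zero =>
    intro k hk
    rw [pvContLines, if_neg (by simp only [PySem.List.len]; omega)]
    rw [List.drop_of_length_le (by omega)]
    simp [pvChunks4]
  | succ n ih =>
    intro k hk
    by_cases hlt : k < l.length
    · rw [pvContLines, if_pos (by simp only [PySem.List.len]; exact_mod_cast hlt)]
      obtain ⟨v, tl, hvt⟩ := List.exists_cons_of_ne_nil
        (l := l.drop k) (by simp [List.drop_eq_nil_iff]; omega)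
      have h4 : ((k : Int) + 4) = ((k + 4 : Nat) : Int) := by push_cast; ring
      rw [h4, ih (k + 4) (by omega)]
      rw [hvt, pvChunks4, List.map_cons]
      have hsl : PySem.List.slice l (some (k : Int)) (some ((k + 4 : Nat) : Int))
          = (l.drop k).take 4 := by
        rw [show ((k + 4 : Nat) : Int) = ((k : Int) + ((4 : Nat) : Int)) from by push_cast; ring]
        exact PySem.List.slice_natCast_add l k 4
      rw [hsl, hvt]
      have hdd : l.drop (k + 4) = (v :: tl).drop 4 := by
        rw [← hvt, List.drop_drop]
      rw [hdd]
    · rw [pvContLines, if_neg (by simp only [PySem.List.len]; omega)]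
      rw [List.drop_of_length_le (by omega)]
      simp [pvChunks4]

-- A's str_list_change on a nonempty list is B's continuation block joined by newlines
theorem pvSLC_nonempty (v : List Char) (tl : List (List Char)) :
    pvStrListChange "+,".toList (v :: tl) 4
      = PySem.Chars.join "\n".toList
          ((pvChunks4 (v :: tl)).map (fun c => "+,".toList ++ PySem.Chars.join ",".toList c)) := by
  rw [pvStrListChange]
  rw [pvSLCloop]
  norm_num [pvMod4]
  rw [pvSLCloop_gen tl 1 [v] [] (by norm_num)]
  norm_num [pvChunks4]
  simp

theorem pvJoin_cons_ne (sep p : List Char) (c : List (List Char)) (hc : c ≠ []) :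
    PySem.Chars.join sep (p :: c) = p ++ sep ++ PySem.Chars.join sep c := by
  obtain ⟨q, rest, rfl⟩ := List.exists_cons_of_ne_nil hc
  exact PySem.Chars.join_cons_cons sep p q rest

-- ===== VERDICT (by name: the statement is the Claim_ definition above) =====
theorem create_dload_unit_str_spec : Claim_equal_create_dload_unit_str := by
  intro dload_name dload_id tload1_ids color _
  unfold Spec_create_dload_unit_str create_dload_unit_str create_dload_unit_str_alt
  dsimp only
  rw [PySem.List.slice_to _ (by norm_num : (0:Int) ≤ 3),
      PySem.List.slice_from _ (by norm_num : (0:Int) ≤ 3),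
      PySem.List.slice_to _ (by norm_num : (0:Int) ≤ 3),
      PySem.List.slice_from _ (by norm_num : (0:Int) ≤ 3)]
  simp only [show ((3:Int)).toNat = 3 from rfl, List.map_take, List.map_drop]
  by_cases h : tload1_ids.length > 3
  · rw [if_pos h]
    obtain ⟨v, tl, hvt⟩ : ∃ v tl, (tload1_ids.map (fun nid => "1.0,".toList ++ PySem.Int.toChars nid)).drop 3 = v :: tl :=
      List.exists_cons_of_ne_nil (by simp; omega)
    rw [hvt, pvSLC_nonempty]
    rw [show (0 : Int) = ((0 : Nat) : Int) from rfl,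
        pvContLines_eq _ (v :: tl).length 0 (by omega), List.drop_zero]
    have hcne : (pvChunks4 (v :: tl)).map
        (fun c => "+,".toList ++ PySem.Chars.join ",".toList c) ≠ [] := by
      rw [pvChunks4]; simp
    simp only [List.cons_append, List.nil_append]
    simp only [PySem.Chars.join_cons_cons, PySem.Chars.join_singleton]
    rw [pvJoin_cons_ne _ _ _ hcne]
    simp [pvLoadcolTitle, pvStrint, PySem.Chars.join_cons_cons, PySem.Chars.join_singleton,
          List.append_assoc]
  · rw [if_neg h]
    have hrest : (tload1_ids.map (fun nid => "1.0,".toList ++ PySem.Int.toChars nid)).drop 3 = [] := by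
      simp; omega
    have htake : (tload1_ids.map (fun nid => "1.0,".toList ++ PySem.Int.toChars nid)).take 3
        = tload1_ids.map (fun nid => "1.0,".toList ++ PySem.Int.toChars nid) :=
      List.take_of_length_le (by simp; omega)
    rw [hrest, htake]
    rw [show (0 : Int) = ((0 : Nat) : Int) from rfl,
        pvContLines_eq _ 0 0 (by simp)]
    simp only [List.drop_zero, pvChunks4, List.map_nil, List.append_nil, List.cons_append,
      List.nil_append]
    simp only [PySem.Chars.join_cons_cons, PySem.Chars.join_singleton]
    simp [pvLoadcolTitle, pvStrint, PySem.Chars.join_cons_cons, PySem.Chars.join_singleton,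
          List.append_assoc]
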